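-- pv_equiv track=rewrite | github.com/Erik262/AoC | day_07/puzzle.py | count_splits2
-- ===== SOURCE A (Python) =====
-- def count_splits2(grid: list[str]) -> int:
--     H, W = len(grid), len(grid[0])
--
--     for r, row in enumerate(grid):
--         c = row.find('S')
--         if c != -1:
--             sr, sc = r, c
--             break
--
--     dp = [[0] * W for _ in range(H)]
--     dp[sr][sc] = 1
--
--     finished = 0
--
--     for r in range(sr, H):
--         for c in range(W):
--             k = dp[r][c]
--             if k == 0:
--                 continue
--
--             if r == H - 1:
--                 finished += k
--                 continue
--
--             below = grid[r + 1][c]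
--
--             if below in ('.', 'S'):
--                 dp[r + 1][c] += k
--
--             elif below == '^':
--                 if c > 0:
--                     dp[r + 1][c - 1] += k
--                 else:
--                     finished += k
--                 if c + 1 < W:
--                     dp[r + 1][c + 1] += k
--                 else:
--                     finished += k
--
--     return finished
-- ===== SOURCE B (Python) =====
-- def count_splits2(grid: list[str]) -> int:
--     # Backward DP: count finished paths from each cell, bottom row upward; return the count at S.
--     H, W = len(grid), len(grid[0])
--
--     for r, row in enumerate(grid):
--         c = row.find('S')
--         if c != -1:
--             sr, sc = r, c
--             break
--
--     f = [1] * W  # finished-path counts for cells of the last row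
--     for r in range(H - 2, sr - 1, -1):
--         nxt = grid[r + 1]
--         g = []
--         for c in range(W):
--             b = nxt[c]
--             if b in ('.', 'S'):
--                 g.append(f[c])
--             elif b == '^':
--                 g.append((f[c - 1] if c > 0 else 1) + (f[c + 1] if c + 1 < W else 1))
--             else:
--                 g.append(0)
--         f = g
--     return f[sc]
-- ===== Notes on version B (the rewrite author's own statement) =====
-- stated objective: alternative
-- what changed: Replaces A's forward mass-propagation DP (dp table seeded at S plus a running 'finished' counter) by a backward DP that computes, row by row from the bottom up, the number of finished paths from each cell and reads off the value at S.
-- outside the precondition, e.g. on count_splits2(['S.', '.']): A returns 1, B raises IndexError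
import Mathlib
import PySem

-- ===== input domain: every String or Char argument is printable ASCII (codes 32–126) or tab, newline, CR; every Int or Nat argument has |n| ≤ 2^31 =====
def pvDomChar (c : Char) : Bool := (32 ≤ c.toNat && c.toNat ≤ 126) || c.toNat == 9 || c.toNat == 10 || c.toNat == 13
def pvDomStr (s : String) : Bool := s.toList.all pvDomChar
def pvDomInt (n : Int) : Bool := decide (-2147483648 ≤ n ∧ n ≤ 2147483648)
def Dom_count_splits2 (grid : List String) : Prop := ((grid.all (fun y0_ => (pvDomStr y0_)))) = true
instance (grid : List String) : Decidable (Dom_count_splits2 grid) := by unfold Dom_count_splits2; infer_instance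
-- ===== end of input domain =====

-- B replaces A's forward mass-propagation DP (dp table seeded at S plus a running 'finished'
-- counter) by a backward row-by-row DP counting finished paths from each cell; same cost.

-- ===== PORT A =====
-- the first-match scan for 'S' (shared by both Pythons verbatim)
def pvFindS : List String → Nat → Option (Nat × Nat)
  | [], _ => none
  | row :: rest, r =>
    let c := PySem.Str.find row "S"
    if c ≠ -1 then some (r, c.toNat) else pvFindS rest (r + 1)

-- grid[r][c] (always used in range inside Pre_)
def pvChar (grid : List String) (r c : Nat) : Char :=
  ((grid.getD r "").toList).getD c ' '

def pvGet2 (dp : List (List Int)) (r c : Nat) : Int := (dp.getD r []).getD c 0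

-- dp[r][c] += k
def pvAdd2 (dp : List (List Int)) (r c : Nat) (k : Int) : List (List Int) :=
  dp.set r ((dp.getD r []).set c ((dp.getD r []).getD c 0 + k))

-- the body of A's inner loop over c
def pvCell (grid : List String) (H W r : Nat) (st2 : List (List Int) × Int) (c : Nat) :
    List (List Int) × Int :=
  let k := pvGet2 st2.1 r c
  if k = 0 then st2
  else if r = H - 1 then (st2.1, st2.2 + k)
  else
    let below := pvChar grid (r + 1) c
    if below = '.' ∨ below = 'S' then (pvAdd2 st2.1 (r + 1) c k, st2.2)
    else if below = '^' then
      let st3 := if 0 < c then (pvAdd2 st2.1 (r + 1) (c - 1) k, st2.2)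
                 else (st2.1, st2.2 + k)
      if c + 1 < W then (pvAdd2 st3.1 (r + 1) (c + 1) k, st3.2) else (st3.1, st3.2 + k)
    else st2

-- A's inner loop: for c in range(W)
def pvRow (grid : List String) (H W : Nat) (st : List (List Int) × Int) (r : Nat) :
    List (List Int) × Int :=
  (List.range W).foldl (fun s c => pvCell grid H W r s c) st

def count_splits2 (grid : List String) : Int :=
  let H := grid.length
  let W := ((grid.getD 0 "").toList).length
  match pvFindS grid 0 with
  | none => 0  -- Python raises NameError here; excluded by Pre_
  | some (sr, sc) =>
    let base := List.replicate H (List.replicate W (0 : Int))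
    let dp0 := base.set sr ((base.getD sr []).set sc 1)
    ((List.range' sr (H - sr)).foldl (pvRow grid H W) (dp0, 0)).2

-- ===== PORT B =====
-- the body of B's loop: from the counts f for row r+1, build the counts for row r
def pvBStep (grid : List String) (W r : Nat) (f : List Int) : List Int :=
  (List.range W).map (fun c =>
    let b := pvChar grid (r + 1) c
    if b = '.' ∨ b = 'S' then f.getD c 0
    else if b = '^' then
      (if 0 < c then f.getD (c - 1) 0 else 1) + (if c + 1 < W then f.getD (c + 1) 0 else 1)
    else 0)

def count_splits2_alt (grid : List String) : Int :=
  let H := grid.length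
  let W := ((grid.getD 0 "").toList).length
  match pvFindS grid 0 with
  | none => 0  -- Python raises here; excluded by Pre_
  | some (sr, sc) =>
    (((List.range' sr (H - 1 - sr)).reverse).foldl (fun f r => pvBStep grid W r f)
      (List.replicate W (1 : Int))).getD sc 0

-- ===== PRECONDITION & SPEC =====
-- Pre_ excludes grids with no 'S' (A raises NameError / UnboundLocalError), the empty grid
-- (A raises IndexError on grid[0]), grids whose first 'S' sits at a column ≥ len(grid[0])
-- (A raises IndexError on dp[sr][sc]), and grids where a row below the S-row is shorter than
-- row 0, a malformed input on which A may or may not raise IndexError depending on which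
-- cells its paths happen to reach.
def Pre_count_splits2 (grid : List String) : Prop :=
  grid ≠ [] ∧ (∃ row ∈ grid, 'S' ∈ row.toList) ∧
  ((grid.getD (grid.findIdx (fun row => decide ('S' ∈ row.toList))) "").toList.takeWhile
      (fun c => c ≠ 'S')).length < ((grid.getD 0 "").toList).length ∧
  ∀ r' < grid.length, grid.findIdx (fun row => decide ('S' ∈ row.toList)) < r' →
    ((grid.getD 0 "").toList).length ≤ ((grid.getD r' "").toList).length
instance (grid : List String) : Decidable (Pre_count_splits2 grid) := by
  unfold Pre_count_splits2; infer_instance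

def pvWitness_count_splits2 : List String := ["S.", "^."]

def Spec_count_splits2 (grid : List String) (out : Int) : Prop := out = count_splits2_alt grid
instance (grid : List String) (out : Int) : Decidable (Spec_count_splits2 grid out) := by
  unfold Spec_count_splits2; infer_instance

-- ===== CLAIM (what is proved, stated in full; the proofs are below) =====
def Claim_equal_count_splits2 : Prop := ∀ (grid : List String), Dom_count_splits2 grid → Pre_count_splits2 grid → Spec_count_splits2 grid (count_splits2 grid)

-- ===== LEMMAS AND PROOFS =====

-- dot product, truncating at the shorter list
def pvDot : List Int → List Int → Int
  | a :: l, b :: m => a * b + pvDot l m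
  | _, _ => 0

-- B's value for row r, as a downward recursion: pvBF n r = counts for row r when there are
-- n rows strictly between r and the last row H-1 (n = H-1-r)
def pvBF (grid : List String) (W : Nat) : Nat → Nat → List Int
  | 0, _ => List.replicate W 1
  | n + 1, r => pvBStep grid W r (pvBF grid W n (r + 1))

theorem pvDot_nil_right (l : List Int) : pvDot l [] = 0 := by
  cases l <;> simp [pvDot]

theorem pvDot_replicate_zero (n : Nat) (m : List Int) :
    pvDot (List.replicate n 0) m = 0 := by
  induction n generalizing m with
  | zero => simp [pvDot]
  | succ k ih => cases m with
    | nil => simp [pvDot]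
    | cons b m => simp [List.replicate_succ, pvDot, ih]

theorem pvDot_set_one (W sc : Nat) (m : List Int) (h : sc < W) :
    pvDot ((List.replicate W (0 : Int)).set sc 1) m = m.getD sc 0 := by
  induction W generalizing sc m with
  | zero => omega
  | succ k ih =>
    cases sc with
    | zero => cases m with
      | nil => simp [List.replicate_succ, pvDot_nil_right]
      | cons b m => simp [List.replicate_succ, pvDot, pvDot_replicate_zero]
    | succ j => cases m with
      | nil => simp [List.replicate_succ, pvDot_nil_right]
      | cons b m => simp [List.replicate_succ, pvDot, ih j m (by omega)]

theorem pvDot_setAdd (l m : List Int) (j : Nat) (k : Int)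
    (hj : j < l.length) (hl : l.length = m.length) :
    pvDot (l.set j (l.getD j 0 + k)) m = pvDot l m + k * m.getD j 0 := by
  induction l generalizing m j with
  | nil => simp at hj
  | cons a l ih =>
    cases m with
    | nil => simp at hl
    | cons b m =>
      cases j with
      | zero => simp [pvDot]; ring
      | succ j =>
        simp only [List.set_cons_succ, List.getD_cons_succ, pvDot]
        rw [ih m j (by simpa using hj) (by simpa using hl)]
        ring

theorem pvDot_drop_succ (u v : List Int) (c : Nat) (hc : c < v.length) :
    pvDot (u.drop c) (v.drop c)
      = u.getD c 0 * v.getD c 0 + pvDot (u.drop (c + 1)) (v.drop (c + 1)) := by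
  induction c generalizing u v with
  | zero =>
    cases v with
    | nil => simp at hc
    | cons b v =>
      cases u with
      | nil => simp [pvDot]
      | cons a u => simp [pvDot]
  | succ j ih =>
    cases v with
    | nil => simp at hc
    | cons b v =>
      cases u with
      | nil => simp [pvDot]
      | cons a u => simpa using ih u v (by simpa using hc)

theorem pvBStep_length (grid : List String) (W r : Nat) (f : List Int) :
    (pvBStep grid W r f).length = W := by simp [pvBStep]

theorem pvBF_length (grid : List String) (W : Nat) (n r : Nat) :
    (pvBF grid W n r).length = W := by
  cases n <;> simp [pvBF, pvBStep_length]

theorem pvBStep_getD (grid : List String) (W r c : Nat) (f : List Int) (hc : c < W) :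
    (pvBStep grid W r f).getD c 0 =
      (let b := pvChar grid (r + 1) c
       if b = '.' ∨ b = 'S' then f.getD c 0
       else if b = '^' then
         (if 0 < c then f.getD (c - 1) 0 else 1) + (if c + 1 < W then f.getD (c + 1) 0 else 1)
       else 0) := by
  simp [pvBStep, List.getD, hc]

theorem getD_set_self {α : Type} (l : List α) (i : Nat) (v d : α) (h : i < l.length) :
    (l.set i v).getD i d = v := by
  simp [List.getD, h]

theorem getD_set_ne {α : Type} (l : List α) (i j : Nat) (v d : α) (h : i ≠ j) :
    (l.set i v).getD j d = l.getD j d := by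
  simp [List.getD, List.getElem?_set_ne, h]

theorem getD_replicate_lt {α : Type} (n i : Nat) (v d : α) (h : i < n) :
    (List.replicate n v).getD i d = v := by
  simp [List.getD, h]

theorem pvAdd2_step (W : Nat) (dp : List (List Int)) (i j : Nat) (k : Int) (m : List Int)
    (hdp : i < dp.length) (hlen : (dp.getD i []).length = W)
    (hj : j < W) (hm : m.length = W) :
    (pvAdd2 dp i j k).length = dp.length ∧
    (∀ r', r' ≠ i → (pvAdd2 dp i j k).getD r' [] = dp.getD r' []) ∧
    ((pvAdd2 dp i j k).getD i []).length = W ∧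
    pvDot ((pvAdd2 dp i j k).getD i []) m
      = pvDot (dp.getD i []) m + k * m.getD j 0 := by
  have hrow : (pvAdd2 dp i j k).getD i []
      = (dp.getD i []).set j ((dp.getD i []).getD j 0 + k) :=
    getD_set_self dp i _ [] hdp
  refine ⟨by simp [pvAdd2],
    fun r' hne => getD_set_ne dp i r' _ [] (fun h => hne h.symm), ?_, ?_⟩
  · rw [hrow, List.length_set]; exact hlen
  · rw [hrow, pvDot_setAdd _ m j k (by omega) (by omega)]

-- one step of A's inner loop, measured against B's row pvBStep grid W r m
theorem cell_step (grid : List String) (H W r c : Nat) (hrH : r ≠ H - 1) (hc : c < W)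
    (m : List Int) (hm : m.length = W)
    (dp : List (List Int)) (fin : Int) (hdp : r + 1 < dp.length)
    (hlen : (dp.getD (r + 1) []).length = W) :
    (pvCell grid H W r (dp, fin) c).1.length = dp.length ∧
    (∀ r', r' ≠ r + 1 → (pvCell grid H W r (dp, fin) c).1.getD r' [] = dp.getD r' []) ∧
    ((pvCell grid H W r (dp, fin) c).1.getD (r + 1) []).length = W ∧
    (pvCell grid H W r (dp, fin) c).2 + pvDot ((pvCell grid H W r (dp, fin) c).1.getD (r + 1) []) m
      = fin + pvDot (dp.getD (r + 1) []) m
        + (dp.getD r []).getD c 0 * (pvBStep grid W r m).getD c 0 := by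
  have hfrow := pvBStep_getD grid W r c m hc
  have hkk : pvGet2 dp r c = (dp.getD r []).getD c 0 := rfl
  by_cases hk0 : pvGet2 dp r c = 0
  · have hres : pvCell grid H W r (dp, fin) c = (dp, fin) := by simp [pvCell, hk0]
    rw [hres]
    refine ⟨rfl, fun _ _ => rfl, hlen, ?_⟩
    rw [← hkk, hk0]; ring
  · by_cases hdot : pvChar grid (r + 1) c = '.' ∨ pvChar grid (r + 1) c = 'S'
    · have hres : pvCell grid H W r (dp, fin) c
          = (pvAdd2 dp (r + 1) c (pvGet2 dp r c), fin) := by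
        simp [pvCell, hk0, hrH, hdot]
      obtain ⟨a1, a2, a3, a4⟩ :=
        pvAdd2_step W dp (r + 1) c (pvGet2 dp r c) m hdp hlen hc hm
      have hf2 : (pvBStep grid W r m).getD c 0 = m.getD c 0 := by
        rw [hfrow]; simp [hdot]
      rw [hres]
      refine ⟨a1, a2, a3, ?_⟩
      rw [a4, hf2, ← hkk]; ring
    · by_cases hcar : pvChar grid (r + 1) c = '^'
      · have hf2 : (pvBStep grid W r m).getD c 0
            = (if 0 < c then m.getD (c - 1) 0 else 1)
              + (if c + 1 < W then m.getD (c + 1) 0 else 1) := by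
          rw [hfrow]; simp [hcar]
        by_cases hc0 : 0 < c <;> by_cases hc1 : c + 1 < W
        · have hres : pvCell grid H W r (dp, fin) c
              = (pvAdd2 (pvAdd2 dp (r + 1) (c - 1) (pvGet2 dp r c)) (r + 1) (c + 1)
                  (pvGet2 dp r c), fin) := by
            simp [pvCell, hk0, hrH, hcar, hc0, hc1]
          obtain ⟨a1, a2, a3, a4⟩ :=
            pvAdd2_step W dp (r + 1) (c - 1) (pvGet2 dp r c) m hdp hlen (by omega) hm
          obtain ⟨b1, b2, b3, b4⟩ :=
            pvAdd2_step W (pvAdd2 dp (r + 1) (c - 1) (pvGet2 dp r c)) (r + 1) (c + 1)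
              (pvGet2 dp r c) m (by omega) a3 (by omega) hm
          rw [hres]
          refine ⟨by rw [b1, a1], fun r' h => by rw [b2 r' h, a2 r' h], b3, ?_⟩
          rw [b4, a4, hf2, ← hkk]
          simp [hc0, hc1]; ring
        · have hres : pvCell grid H W r (dp, fin) c
              = (pvAdd2 dp (r + 1) (c - 1) (pvGet2 dp r c), fin + pvGet2 dp r c) := by
            simp [pvCell, hk0, hrH, hcar, hc0, hc1]
          obtain ⟨a1, a2, a3, a4⟩ :=
            pvAdd2_step W dp (r + 1) (c - 1) (pvGet2 dp r c) m hdp hlen (by omega) hm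
          rw [hres]
          refine ⟨a1, a2, a3, ?_⟩
          rw [a4, hf2, ← hkk]
          simp [hc0, hc1]; ring
        · have hres : pvCell grid H W r (dp, fin) c
              = (pvAdd2 dp (r + 1) (c + 1) (pvGet2 dp r c), fin + pvGet2 dp r c) := by
            simp [pvCell, hk0, hrH, hcar, hc0, hc1]
          obtain ⟨a1, a2, a3, a4⟩ :=
            pvAdd2_step W dp (r + 1) (c + 1) (pvGet2 dp r c) m hdp hlen (by omega) hm
          rw [hres]
          refine ⟨a1, a2, a3, ?_⟩
          rw [a4, hf2, ← hkk]
          simp [hc0, hc1]; ring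
        · have hres : pvCell grid H W r (dp, fin) c
              = (dp, fin + pvGet2 dp r c + pvGet2 dp r c) := by
            simp [pvCell, hk0, hrH, hcar, hc0, hc1]
          rw [hres]
          refine ⟨rfl, fun _ _ => rfl, hlen, ?_⟩
          rw [hf2, ← hkk]
          simp [hc0, hc1]; ring
      · have hres : pvCell grid H W r (dp, fin) c = (dp, fin) := by
          simp [pvCell, hk0, hrH, hdot, hcar]
        have hf2 : (pvBStep grid W r m).getD c 0 = 0 := by
          rw [hfrow]; simp [hdot, hcar]
        rw [hres]
        refine ⟨rfl, fun _ _ => rfl, hlen, ?_⟩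
        rw [hf2]; ring

theorem inner_loop (grid : List String) (H W r : Nat) (hrH : r ≠ H - 1)
    (m : List Int) (hm : m.length = W) :
    ∀ (n c : Nat) (dp : List (List Int)) (fin : Int),
      c + n = W → r + 1 < dp.length → (dp.getD (r + 1) []).length = W →
      ((List.range' c n).foldl (pvCell grid H W r) (dp, fin)).1.length = dp.length ∧
      (∀ r', r' ≠ r + 1 →
        ((List.range' c n).foldl (pvCell grid H W r) (dp, fin)).1.getD r' [] = dp.getD r' []) ∧
      (((List.range' c n).foldl (pvCell grid H W r) (dp, fin)).1.getD (r + 1) []).length = W ∧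
      ((List.range' c n).foldl (pvCell grid H W r) (dp, fin)).2
          + pvDot (((List.range' c n).foldl (pvCell grid H W r) (dp, fin)).1.getD (r + 1) []) m
        = fin + pvDot (dp.getD (r + 1) []) m
          + pvDot ((dp.getD r []).drop c) ((pvBStep grid W r m).drop c) := by
  intro n
  induction n with
  | zero =>
    intro c dp fin hcw hdp hlen
    have hd : (pvBStep grid W r m).drop c = [] := by
      apply List.drop_of_length_le; rw [pvBStep_length]; omega
    refine ⟨rfl, fun _ _ => rfl, hlen, ?_⟩
    show fin + pvDot (dp.getD (r + 1) []) m
        = fin + pvDot (dp.getD (r + 1) []) m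
          + pvDot ((dp.getD r []).drop c) ((pvBStep grid W r m).drop c)
    rw [hd, pvDot_nil_right]; ring
  | succ k ih =>
    intro c dp fin hcw hdp hlen
    have hc : c < W := by omega
    rw [List.range'_succ, List.foldl_cons]
    obtain ⟨h1, h2, h3, h4⟩ := cell_step grid H W r c hrH hc m hm dp fin hdp hlen
    obtain ⟨g1, g2, g3, g4⟩ := ih (c + 1) (pvCell grid H W r (dp, fin) c).1
      (pvCell grid H W r (dp, fin) c).2 (by omega) (by omega) h3
    simp only [Prod.mk.eta] at g1 g2 g3 g4
    have hrr : (pvCell grid H W r (dp, fin) c).1.getD r [] = dp.getD r [] :=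
      h2 r (by omega)
    rw [hrr] at g4
    have hd := pvDot_drop_succ (dp.getD r []) (pvBStep grid W r m) c
      (by rw [pvBStep_length]; omega)
    exact ⟨by rw [g1, h1], fun r' hr' => (g2 r' hr').trans (h2 r' hr'), g3,
      by rw [hd]; omega⟩

theorem inner_last (grid : List String) (H W : Nat) :
    ∀ (n c : Nat) (dp : List (List Int)) (fin : Int), c + n = W →
      (List.range' c n).foldl (pvCell grid H W (H - 1)) (dp, fin)
        = (dp, fin + pvDot ((dp.getD (H - 1) []).drop c)
            ((List.replicate W (1 : Int)).drop c)) := by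
  intro n
  induction n with
  | zero =>
    intro c dp fin hcw
    have : ((List.replicate W (1 : Int)).drop c) = [] := by
      apply List.drop_of_length_le; simp; omega
    simp [this, pvDot_nil_right]
  | succ k ih =>
    intro c dp fin hcw
    rw [List.range'_succ, List.foldl_cons]
    have hstep : pvCell grid H W (H - 1) (dp, fin) c
        = (dp, fin + (dp.getD (H - 1) []).getD c 0) := by
      by_cases hk : pvGet2 dp (H - 1) c = 0
      · have h0 : (dp.getD (H - 1) []).getD c 0 = 0 := hk
        simp [pvCell, hk]
        simpa [List.getD] using h0
      · simp [pvCell, pvGet2]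
    rw [hstep, ih (c + 1) dp (fin + (dp.getD (H - 1) []).getD c 0) (by omega)]
    have hdrop := pvDot_drop_succ (dp.getD (H - 1) []) (List.replicate W (1 : Int)) c
      (by simp; omega)
    rw [Prod.mk.injEq]
    constructor
    · rfl
    · rw [hdrop, getD_replicate_lt W c 1 0 (by omega)]; ring

theorem outer_loop (grid : List String) (H W : Nat) :
    ∀ (n r : Nat) (dp : List (List Int)) (fin : Int),
      r + n = H → n ≠ 0 → dp.length = H →
      (∀ r', r < r' → r' < H → dp.getD r' [] = List.replicate W 0) →
      (dp.getD r []).length = W →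
      ((List.range' r n).foldl (pvRow grid H W) (dp, fin)).2
        = fin + pvDot (dp.getD r []) (pvBF grid W (H - 1 - r) r) := by
  intro n
  induction n with
  | zero => intro r dp fin h hn; omega
  | succ k ih =>
    intro r dp fin hrn hn hdpH hz hrw
    cases k with
    | zero =>
      -- r = H - 1, the last row
      have hr : r = H - 1 := by omega
      subst hr
      rw [List.range'_succ]
      simp only [List.foldl_cons]
      simp only [pvRow, List.range_eq_range']
      rw [inner_last grid H W W 0 dp fin (by omega)]
      simp [pvBF]
    | succ k' =>
      have hrH : r ≠ H - 1 := by omega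
      rw [List.range'_succ, List.foldl_cons]
      set m := pvBF grid W (H - 1 - (r + 1)) (r + 1) with hm
      have hmlen : m.length = W := pvBF_length ..
      have hz1 : dp.getD (r + 1) [] = List.replicate W 0 := hz (r + 1) (by omega) (by omega)
      have hil := inner_loop grid H W r hrH m hmlen W 0 dp fin (by omega)
        (by omega) (by rw [hz1]; simp)
      simp only [pvRow, List.range_eq_range'] at hil ⊢
      obtain ⟨hlen1, hrows1, hrlen1, heq1⟩ := hil
      set st1 := (List.range' 0 W).foldl (pvCell grid H W r) (dp, fin) with hst1
      have hih := ih (r + 1) st1.1 st1.2 (by omega) (by simp) (by rw [hlen1, hdpH])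
        (fun r' h1 h2 => by rw [hrows1 r' (by omega)]; exact hz r' (by omega) h2)
        (by exact hrlen1)
      rw [← hm] at hih
      rw [hih]
      have hbf : pvBF grid W (H - 1 - r) r = pvBStep grid W r m := by
        have : H - 1 - r = (H - 1 - (r + 1)) + 1 := by omega
        rw [this, pvBF]
      rw [hbf]
      rw [hz1, pvDot_replicate_zero] at heq1
      simp only [List.drop_zero] at heq1
      omega

theorem alt_fold (grid : List String) (W : Nat) :
    ∀ (n r : Nat),
      ((List.range' r n).reverse).foldl (fun f r => pvBStep grid W r f)
          (List.replicate W (1 : Int))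
        = pvBF grid W n r := by
  intro n
  induction n with
  | zero => intro r; simp [pvBF]
  | succ k ih =>
    intro r
    rw [List.foldl_reverse, List.range'_succ, List.foldr_cons]
    have : (List.range' (r + 1) k).foldr (fun x y => pvBStep grid W x y)
        (List.replicate W (1 : Int)) = pvBF grid W k (r + 1) := by
      rw [← List.foldl_reverse, ih (r + 1)]
    rw [this, pvBF]


-- first-index facts linking the ports' 'S' scan to Pre_'s closed-form description
theorem find_toNat_eq_takeWhile (l : List Char) (h : 'S' ∈ l) :
    (PySem.Chars.find l ['S']).toNat = (l.takeWhile (fun c => c ≠ 'S')).length := by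
  have hfind_ne : PySem.Chars.find l ['S'] ≠ -1 := by
    rw [PySem.Chars.find_ne_neg_one_iff]
    obtain ⟨s, t, heq⟩ := List.append_of_mem h
    exact ⟨s, t, by simp [heq]⟩
  have hnn : 0 ≤ PySem.Chars.find l ['S'] := (PySem.Chars.find_nonneg_iff _ _).mpr
    ((PySem.Chars.find_ne_neg_one_iff _ _).mp hfind_ne)
  obtain ⟨hpre, hmin⟩ := PySem.Chars.find_spec (s := l) (sub := ['S']) hnn
  have hat : l[(PySem.Chars.find l ['S']).toNat]? = some 'S' := by
    rw [← List.head?_drop]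
    obtain ⟨u, hu⟩ := hpre
    rw [← hu]; rfl
  have htl : (PySem.Chars.find l ['S']).toNat < l.length := by
    by_contra hge
    rw [List.getElem?_eq_none_iff.mpr (by omega)] at hat
    simp at hat
  have hdw_ne : l.dropWhile (fun c => c ≠ 'S') ≠ [] := by
    intro hnil
    have hta : l.takeWhile (fun c => (c ≠ 'S' : Bool)) = l := by
      have hs := List.takeWhile_append_dropWhile (p := fun c => (c ≠ 'S' : Bool)) (l := l)
      rw [hnil] at hs; simpa using hs
    have hmem' : 'S' ∈ List.takeWhile (fun c => (c ≠ 'S' : Bool)) l := by rw [hta]; exact h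
    have := List.mem_takeWhile_imp hmem'
    simp at this
  set tw := (l.takeWhile (fun c => (c ≠ 'S' : Bool))).length with htw
  have hattw : l[tw]? = some 'S' := by
    conv_lhs => rw [← List.takeWhile_append_dropWhile (p := fun c => (c ≠ 'S' : Bool)) (l := l)]
    rw [List.getElem?_append_right (by omega)]
    have hz : tw - (l.takeWhile (fun c => (c ≠ 'S' : Bool))).length = 0 := by omega
    rw [hz, ← List.head?_eq_getElem?]
    cases hh : (l.dropWhile (fun c => (c ≠ 'S' : Bool))).head? with
    | none => exact absurd (List.head?_eq_none_iff.mp hh) hdw_ne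
    | some a =>
      have hfail := List.head?_dropWhile_not (fun c => (c ≠ 'S' : Bool)) l
      rw [hh] at hfail
      have : a = 'S' := by simpa using hfail
      rw [this]
  have htwl : tw < l.length := by
    by_contra hge
    rw [List.getElem?_eq_none_iff.mpr (by omega)] at hattw
    simp at hattw
  by_contra hne
  rcases Nat.lt_or_ge (PySem.Chars.find l ['S']).toNat tw with hlt | hge
  · -- element inside takeWhile would be 'S'
    obtain ⟨u, hu⟩ := List.takeWhile_prefix (p := fun c => (c ≠ 'S' : Bool)) (l := l)
    have hat2 : (List.takeWhile (fun c => (c ≠ 'S' : Bool)) l ++ u)[(PySem.Chars.find l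
        ['S']).toNat]? = some 'S' := by rw [hu]; exact hat
    rw [List.getElem?_append_left (by omega)] at hat2
    have := List.mem_takeWhile_imp (List.mem_of_getElem? hat2)
    simp at this
  · have hlt2 : tw < (PySem.Chars.find l ['S']).toNat := by omega
    apply hmin _ hlt2
    rw [List.getElem?_eq_getElem htwl] at hattw
    refine ⟨l.drop (tw + 1), ?_⟩
    rw [List.drop_eq_getElem_cons htwl]
    simp [Option.some_inj.mp hattw]

theorem pvFindS_eq : ∀ (grid : List String) (i : Nat),
    (∃ row ∈ grid, 'S' ∈ row.toList) →
    pvFindS grid i = some (i + grid.findIdx (fun row => decide ('S' ∈ row.toList)),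
      ((grid.getD (grid.findIdx (fun row => decide ('S' ∈ row.toList))) "").toList.takeWhile
        (fun c => c ≠ 'S')).length) ∧
    grid.findIdx (fun row => decide ('S' ∈ row.toList)) < grid.length := by
  intro grid
  induction grid with
  | nil => intro i h; simp at h
  | cons row rest ih =>
    intro i h
    by_cases hr : 'S' ∈ row.toList
    · have hf' : PySem.Chars.find row.toList ['S'] ≠ -1 := by
        rw [PySem.Chars.find_ne_neg_one_iff]
        obtain ⟨s, t, heq⟩ := List.append_of_mem hr
        exact ⟨s, t, by simp [heq]⟩
      have htn := find_toNat_eq_takeWhile row.toList hr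
      constructor
      · simp [pvFindS, hf', List.findIdx_cons, hr, htn]
      · simp [List.findIdx_cons, hr]
    · have hf0 : PySem.Chars.find row.toList ['S'] = -1 := by
        rw [PySem.Chars.find_eq_neg_one_iff]
        intro hinf
        exact hr (hinf.mem (by simp))
      have h' : ∃ r ∈ rest, 'S' ∈ r.toList := by
        obtain ⟨r, hrm, hS⟩ := h
        rcases List.mem_cons.mp hrm with rfl | hrm'
        · exact absurd hS hr
        · exact ⟨r, hrm', hS⟩
      obtain ⟨heq, hlt⟩ := ih (i + 1) h'
      have hstep : pvFindS (row :: rest) i = pvFindS rest (i + 1) := by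
        simp [pvFindS, hf0]
      refine ⟨?_, by simp [List.findIdx_cons, hr]; omega⟩
      rw [hstep, heq]
      simp [List.findIdx_cons, hr]
      omega

-- ===== VERDICT (by name: the statement is the Claim_ definition above) =====
theorem count_splits2_spec : Claim_equal_count_splits2 := by
  intro grid hdom hpre
  unfold Spec_count_splits2
  obtain ⟨hne, hex, hscW0, hrows⟩ := hpre
  obtain ⟨hfind, hsr⟩ := pvFindS_eq grid 0 hex
  simp only [Nat.zero_add] at hfind
  set sr := grid.findIdx (fun row => decide ('S' ∈ row.toList)) with hsrdef
  set sc := ((grid.getD sr "").toList.takeWhile (fun c => c ≠ 'S')).length with hscdef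
  have hscW : sc < ((grid.getD 0 "").toList).length := hscW0
  have hbase : (List.replicate grid.length
      (List.replicate ((grid.getD 0 "").toList).length (0 : Int))).getD sr []
        = List.replicate ((grid.getD 0 "").toList).length 0 :=
    getD_replicate_lt _ sr _ [] hsr
  have hA : count_splits2 grid = ((List.range' sr (grid.length - sr)).foldl
      (pvRow grid grid.length ((grid.getD 0 "").toList).length)
      ((List.replicate grid.length
          (List.replicate ((grid.getD 0 "").toList).length (0 : Int))).set sr
        ((List.replicate ((grid.getD 0 "").toList).length (0 : Int)).set sc 1), 0)).2 := by
    simp only [count_splits2, hfind]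
    rw [hbase]
  have hrowsr : ((List.replicate grid.length
      (List.replicate ((grid.getD 0 "").toList).length (0 : Int))).set sr
        ((List.replicate ((grid.getD 0 "").toList).length (0 : Int)).set sc 1)).getD sr []
      = (List.replicate ((grid.getD 0 "").toList).length (0 : Int)).set sc 1 :=
    getD_set_self _ sr _ [] (by simpa using hsr)
  have houter := outer_loop grid grid.length ((grid.getD 0 "").toList).length
      (grid.length - sr) sr
      ((List.replicate grid.length
          (List.replicate ((grid.getD 0 "").toList).length (0 : Int))).set sr
        ((List.replicate ((grid.getD 0 "").toList).length (0 : Int)).set sc 1)) 0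
      (by omega) (by omega) (by simp)
      (fun r' h1 h2 => by
        rw [getD_set_ne _ sr r' _ [] (by omega), getD_replicate_lt _ r' _ [] h2])
      (by rw [hrowsr]; simp)
  rw [hA, houter, hrowsr, pvDot_set_one _ sc _ hscW]
  have hB : count_splits2_alt grid
      = (pvBF grid ((grid.getD 0 "").toList).length (grid.length - 1 - sr) sr).getD sc 0 := by
    simp only [count_splits2_alt, hfind]
    rw [alt_fold]
  rw [hB]
  ring
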